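-- pv_equiv track=rewrite | github.com/whipbaek/Algorithm-Study | 프로그래머스/lv2/87390. n＾2 배열 자르기/n＾2 배열 자르기.py | solution
-- ===== SOURCE A (Python) =====
-- def solution(n, left, right):
--     answer = []
--     sr = left//n
--     er = right//n
--
--     sc = (left%n)
--     ec = (right%n)
--
--     ei = n*(er-sr) + ec
--
--     for i in range(sr+1, er+2):
--         j = i
--         for k in range(1, n+1):
--             if k>i:
--                 j += 1
--                 answer.append(j)
--             else:
--                 answer.append(j)
--     return answer[sc:ei+1]
-- ===== SOURCE B (Python) =====
-- def solution(n, left, right):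
--     # closed form: the flattened n x n snail array has value max(i//n, i%n)+1 at index i
--     return [max(i // n, i % n) + 1 for i in range(left, right + 1)]
-- ===== Notes on version B (the rewrite author's own statement) =====
-- stated objective: faster
-- what changed: B replaces A's row-by-row construction of the n-wide rows left//n..right//n followed by list slicing with the closed form max(i//n,i%n)+1 evaluated only at the requested indices left..right.
-- outside the precondition, e.g. on solution(0, 0, 0): A raises ZeroDivisionError, B raises ZeroDivisionError; on solution(-3, 16, 16): A returns [], B returns [-1]
import Mathlib
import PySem

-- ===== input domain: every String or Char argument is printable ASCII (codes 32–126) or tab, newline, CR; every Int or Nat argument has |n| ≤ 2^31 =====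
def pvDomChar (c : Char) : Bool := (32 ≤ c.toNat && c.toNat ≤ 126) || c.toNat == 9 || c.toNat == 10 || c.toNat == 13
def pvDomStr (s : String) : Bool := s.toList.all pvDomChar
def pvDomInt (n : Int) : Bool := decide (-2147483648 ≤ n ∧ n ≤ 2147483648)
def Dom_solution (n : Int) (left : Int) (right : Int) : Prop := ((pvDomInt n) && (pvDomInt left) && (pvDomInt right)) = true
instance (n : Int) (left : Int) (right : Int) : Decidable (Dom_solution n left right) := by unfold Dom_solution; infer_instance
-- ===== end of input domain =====

-- B computes each requested entry of the flattened snail array by the closed form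
-- max(i//n, i%n)+1 instead of materialising whole rows and slicing (objective: faster).

-- ===== PORT A =====
-- inner 'for k in range(1, n+1)' loop of A, state = (j, answer)
def solutionInner (n i : Int) (st : Int × List Int) : Int × List Int :=
  (PySem.List.pyRange 1 (n+1) 1).foldl
    (fun s k => if k > i then (s.1 + 1, s.2 ++ [s.1 + 1]) else (s.1, s.2 ++ [s.1])) st

-- outer 'for i in range(sr+1, er+2)' loop of A building 'answer'
def solutionAnswer (n sr er : Int) : List Int :=
  (PySem.List.pyRange (sr+1) (er+2) 1).foldl (fun acc i => (solutionInner n i (i, acc)).2) []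

def solution (n : Int) (left : Int) (right : Int) : List Int :=
  let sr := PySem.Int.floordiv left n
  let er := PySem.Int.floordiv right n
  let sc := PySem.Int.mod left n
  let ec := PySem.Int.mod right n
  let ei := n * (er - sr) + ec
  PySem.List.slice (solutionAnswer n sr er) (some sc) (some (ei + 1))

-- ===== PORT B =====
def snailVal (n i : Int) : Int := max (PySem.Int.floordiv i n) (PySem.Int.mod i n) + 1

def solution_alt (n : Int) (left : Int) (right : Int) : List Int :=
  (PySem.List.pyRange left (right + 1) 1).map (fun i => snailVal n i)

-- ===== PRECONDITION & SPEC =====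
-- Pre_ restricts to the task's natural domain (the contest statement guarantees 1 ≤ n and
-- 0 ≤ left): A raises ZeroDivisionError for n = 0, and for n < 0 or left < 0 the negative
-- floor divisions and negative-slice wraparound take A outside the function's meaning.
def Pre_solution (n : Int) (left : Int) (right : Int) : Prop := 1 ≤ n ∧ 0 ≤ left
instance (n : Int) (left : Int) (right : Int) : Decidable (Pre_solution n left right) := by
  unfold Pre_solution; infer_instance

def pvWitness_solution : Int × Int × Int := (3, 2, 7)

def Spec_solution (n : Int) (left : Int) (right : Int) (out : List Int) : Prop :=
  out = solution_alt n left right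
instance (n : Int) (left : Int) (right : Int) (out : List Int) : Decidable (Spec_solution n left right out) := by
  unfold Spec_solution; infer_instance

-- ===== CLAIM (what is proved, stated in full; the proofs are below) =====
def Claim_equal_solution : Prop := ∀ (n : Int) (left : Int) (right : Int),
  Dom_solution n left right → Pre_solution n left right →
  Spec_solution n left right (solution n left right)

-- ===== LEMMAS AND PROOFS =====

-- the inner loop appends max i k for k = a..n, provided j = max i (a-1)
lemma solutionInner_gen (n i : Int) : ∀ (m : Nat) (a j : Int) (acc : List Int),
    (n + 1 - a).toNat = m → 1 ≤ a → j = max i (a - 1) →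
    ((PySem.List.pyRange a (n+1) 1).foldl
      (fun s k => if k > i then (s.1 + 1, s.2 ++ [s.1 + 1]) else (s.1, s.2 ++ [s.1])) (j, acc)).2
    = acc ++ (PySem.List.pyRange a (n+1) 1).map (fun k => max i k) := by
  intro m
  induction m with
  | zero =>
    intro a j acc hm ha hj
    rw [PySem.List.pyRange_one_eq_nil (by omega)]
    simp
  | succ m ih =>
    intro a j acc hm ha hj
    rw [PySem.List.pyRange_one_cons (by omega)]
    simp only [List.foldl_cons, List.map_cons]
    by_cases hai : a > i
    · rw [if_pos hai, ih (a+1) (j+1) (acc ++ [j+1]) (by omega) (by omega) (by omega)]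
      simp [hj]
      omega
    · rw [if_neg hai, ih (a+1) j (acc ++ [j]) (by omega) (by omega) (by omega)]
      simp [hj]
      omega

-- the inner loop from state (i, acc) produces row i (entries max i k, k = 1..n)
lemma solutionInner_eq (n i : Int) (hi : 1 ≤ i) (acc : List Int) :
    (solutionInner n i (i, acc)).2
    = acc ++ (PySem.List.pyRange 1 (n+1) 1).map (fun k => max i k) := by
  rw [solutionInner, solutionInner_gen n i (n + 1 - 1).toNat 1 i acc rfl le_rfl (by omega)]

-- row i written over global flattened indices
lemma row_eq (n i : Int) (hn : 0 < n) :
    (PySem.List.pyRange 1 (n+1) 1).map (fun k => max i k)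
    = (PySem.List.pyRange ((i-1)*n) (i*n) 1).map (fun idx => snailVal n idx) := by
  rw [PySem.List.pyRange_one, PySem.List.pyRange_one]
  have h1 : (n + 1 - 1).toNat = n.toNat := by omega
  have h2 : (i*n - (i-1)*n).toNat = n.toNat := by
    have : i*n - (i-1)*n = n := by ring
    rw [this]
  rw [h1, h2, List.map_map, List.map_map]
  apply List.map_congr_left
  intro k hk
  simp only [List.mem_range] at hk
  have hk' : (k : Int) < n := by omega
  simp only [Function.comp_apply, snailVal]
  have hd : PySem.Int.floordiv ((i-1)*n + k) n = i - 1 := by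
    rw [PySem.Int.floordiv_eq_iff_of_pos hn]
    constructor
    · nlinarith [Int.natCast_nonneg k]
    · nlinarith
  have hm : PySem.Int.mod ((i-1)*n + k) n = k := by
    rw [PySem.Int.mod_eq_emod_of_pos hn]
    have : (i-1)*n + (k:Int) = (k:Int) + n * (i-1) := by ring
    rw [this, Int.add_mul_emod_self_left, Int.emod_eq_of_lt (by positivity) hk']
  rw [hd, hm]
  omega

-- the outer loop concatenates rows a..b'-1, i.e. global indices (a-1)*n .. (b'-1)*n - 1
lemma solutionAnswer_gen (n b' : Int) (hn : 0 < n) : ∀ (m : Nat) (a : Int) (acc : List Int),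
    (b' - a).toNat = m → 1 ≤ a →
    (PySem.List.pyRange a b' 1).foldl (fun acc i => (solutionInner n i (i, acc)).2) acc
    = acc ++ (PySem.List.pyRange ((a-1)*n) ((b'-1)*n) 1).map (fun idx => snailVal n idx) := by
  intro m
  induction m with
  | zero =>
    intro a acc hm ha
    rw [PySem.List.pyRange_one_eq_nil (by omega),
        PySem.List.pyRange_one_eq_nil (by nlinarith [Int.le_of_sub_nonpos (by omega : b' - a ≤ 0)])]
    simp
  | succ m ih =>
    intro a acc hm ha
    rw [PySem.List.pyRange_one_cons (by omega)]
    simp only [List.foldl_cons]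
    rw [solutionInner_eq n a ha, row_eq n a hn, ih (a+1) _ (by omega) (by omega)]
    have hsplit : PySem.List.pyRange ((a-1)*n) ((b'-1)*n) 1
        = PySem.List.pyRange ((a-1)*n) (a*n) 1 ++ PySem.List.pyRange (a*n) ((b'-1)*n) 1 := by
      rw [← PySem.List.pyRange_one_append ((a-1)*n) (a*n) ((b'-1)*n) (by nlinarith)
            (by nlinarith [(by omega : a ≤ b' - 1)])]
    rw [hsplit]
    simp only [List.map_append, List.append_assoc]
    ring_nf

-- A = B on 1 ≤ n, 0 ≤ left (any right)
lemma solution_eq_alt (n left right : Int) (hn : 1 ≤ n) (hl : 0 ≤ left) :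
    solution n left right = solution_alt n left right := by
  have hn0 : 0 < n := hn
  rw [show solution n left right = PySem.List.slice
      (solutionAnswer n (PySem.Int.floordiv left n) (PySem.Int.floordiv right n))
      (some (PySem.Int.mod left n))
      (some (n * (PySem.Int.floordiv right n - PySem.Int.floordiv left n) + PySem.Int.mod right n + 1)) from rfl]
  set sr := PySem.Int.floordiv left n with hsr
  set er := PySem.Int.floordiv right n with her
  set sc := PySem.Int.mod left n with hsc
  set ec := PySem.Int.mod right n with hec
  have eL : sr * n + sc = left := PySem.Int.floordiv_mul_add_mod left n
  have eR : er * n + ec = right := PySem.Int.floordiv_mul_add_mod right n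
  have hsc0 : 0 ≤ sc := PySem.Int.mod_nonneg left hn0
  have hscn : sc < n := PySem.Int.mod_lt left hn0
  have hec0 : 0 ≤ ec := PySem.Int.mod_nonneg right hn0
  have hecn : ec < n := PySem.Int.mod_lt right hn0
  have hsr0 : 0 ≤ sr := by nlinarith
  by_cases hr : right < 0
  · -- er < 0: A's row loop is empty, B's range is empty
    have her0 : er < 0 := by nlinarith
    have hempty : PySem.List.pyRange (sr+1) (er+2) 1 = [] :=
      PySem.List.pyRange_one_eq_nil (by omega)
    rw [show solutionAnswer n sr er = [] by rw [solutionAnswer, hempty]; rfl,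
        show solution_alt n left right = [] by
          rw [solution_alt, PySem.List.pyRange_one_eq_nil (by omega)]; rfl]
    simp [PySem.List.slice]
  · have hr0 : 0 ≤ right := by omega
    have her0 : 0 ≤ er := by nlinarith
    by_cases hse : er < sr
    · -- right < left with er < sr: A's row loop is empty, B's range is empty
      have hrl : right < left := by nlinarith
      have hempty : PySem.List.pyRange (sr+1) (er+2) 1 = [] :=
        PySem.List.pyRange_one_eq_nil (by omega)
      rw [show solutionAnswer n sr er = [] by rw [solutionAnswer, hempty]; rfl,
          show solution_alt n left right = [] by
            rw [solution_alt, PySem.List.pyRange_one_eq_nil (by omega)]; rfl]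
      simp [PySem.List.slice]
    · have hse' : sr ≤ er := by omega
      have hans : solutionAnswer n sr er
          = (PySem.List.pyRange (sr*n) ((er+1)*n) 1).map (fun idx => snailVal n idx) := by
        rw [solutionAnswer,
          solutionAnswer_gen n (er+2) hn0 (er+2-(sr+1)).toNat (sr+1) [] rfl (by omega)]
        rw [show sr + 1 - 1 = sr from by ring, show er + 2 - 1 = er + 1 from by ring]
        simp
      rw [hans]
      set ei := n * (er - sr) + ec with hei
      have hei1 : ei + 1 = right + 1 - sr * n := by rw [hei]; nlinarith
      have hei0 : 0 ≤ ei + 1 := by nlinarith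
      rw [show sc = ((sc.toNat : Nat) : Int) by omega,
          show ei + 1 = (((ei+1).toNat : Nat) : Int) by omega,
          PySem.List.slice_natCast]
      by_cases hlr : right < left
      · -- same final row but right < left: the slice picks nothing
        rw [show (ei+1).toNat - sc.toNat = 0 by omega, List.take_zero,
            solution_alt, PySem.List.pyRange_one_eq_nil (by omega)]
        rfl
      · have hlr' : left ≤ right := by omega
        have hA : sr * n ≤ left := by omega
        have hB : left ≤ right + 1 := by omega
        have hC : right + 1 ≤ (er+1)*n := by nlinarith
        rw [PySem.List.pyRange_one_append (sr*n) left ((er+1)*n) hA (le_trans hB hC),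
            PySem.List.pyRange_one_append left (right+1) ((er+1)*n) hB hC,
            List.map_append, List.map_append,
            List.drop_left' (by
              rw [List.length_map, PySem.List.length_pyRange_one]; omega),
            List.take_append_of_le_length (by
              rw [List.length_map, PySem.List.length_pyRange_one]; omega),
            List.take_of_length_le (by
              rw [List.length_map, PySem.List.length_pyRange_one]; omega)]
        rfl

-- ===== VERDICT (by name: the statement is the Claim_ definition above) =====
theorem solution_spec : Claim_equal_solution := by
  intro n left right _hdom hpre
  exact solution_eq_alt n left right hpre.1 hpre.2
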